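-- pv_equiv track=rewrite | github.com/wangnono2458/pyxel-detector-simulation-framework | pyxel/observation/observation.py | explain_invalid_key
-- ===== SOURCE A (Python) =====
-- def explain_invalid_key(invalid_key: str, valid_keys: list[str]) -> str:
--     parts = invalid_key.split(".")
--     path_so_far = []
--
--     for part in parts:
--         path_so_far.append(part)
--         current = ".".join(path_so_far)
--         if not any(key.startswith(current) for key in valid_keys):
--             pointer_pos = (
--                 len("Missing parameter: '")
--                 + len(".".join(path_so_far[:-1]))
--                 + (1 if path_so_far[:-1] else 0)
--             )
--             pointer_line = " " * pointer_pos + "^" * len(part)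
--             return (
--                 f"Missing parameter: '{invalid_key}'\n"
--                 f"{pointer_line}\n"
--                 f"{' ' * pointer_pos}Non-existing parameter"
--             )
--
--     return f"Missing parameter: '{invalid_key}'"
-- ===== SOURCE B (Python) =====
-- def explain_invalid_key(invalid_key: str, valid_keys: list[str]) -> str:
--     # Alternative single-pass strategy: compute the longest character prefix of
--     # invalid_key shared with any valid key (-1 when there are no keys),
--     # then a single walk over the dot-separated parts to locate the first
--     # segment whose end lies beyond that shared prefix.
--     header = f"Missing parameter: '{invalid_key}'"
--     cmax = -1
--     for key in valid_keys:
--         c = 0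
--         while c < len(key) and c < len(invalid_key) and key[c] == invalid_key[c]:
--             c += 1
--         if c > cmax:
--             cmax = c
--     pos = 0
--     for part in invalid_key.split("."):
--         end = pos + len(part)
--         if end > cmax:
--             indent = " " * (len("Missing parameter: '") + pos)
--             return f"{header}\n{indent}{'^' * len(part)}\n{indent}Non-existing parameter"
--         pos = end + 1
--     return header
-- ===== Notes on version B (the rewrite author's own statement) =====
-- stated objective: alternative
-- what changed: Replaces the nested loop (for each dotted prefix, scan every valid key with startswith) by one pass over the keys computing the longest character prefix each shares with invalid_key, keeping the maximum, then a single positional walk over the parts to find the first segment ending beyond that maximum.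
import Mathlib
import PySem

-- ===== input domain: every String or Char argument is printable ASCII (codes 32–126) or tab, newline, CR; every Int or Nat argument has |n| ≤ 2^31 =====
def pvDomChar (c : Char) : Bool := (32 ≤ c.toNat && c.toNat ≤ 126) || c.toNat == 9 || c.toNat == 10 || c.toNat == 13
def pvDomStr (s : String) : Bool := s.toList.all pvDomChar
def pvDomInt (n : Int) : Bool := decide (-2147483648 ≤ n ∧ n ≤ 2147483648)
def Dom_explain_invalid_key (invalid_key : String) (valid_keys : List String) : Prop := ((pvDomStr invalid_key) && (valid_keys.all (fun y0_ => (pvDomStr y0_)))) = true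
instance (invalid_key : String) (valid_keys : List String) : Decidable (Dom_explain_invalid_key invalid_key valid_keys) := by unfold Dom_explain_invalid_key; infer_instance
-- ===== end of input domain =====

-- ===== PORT A =====
-- B replaces A's nested prefix-by-prefix startswith scan over all keys by one
-- pass over the keys computing the longest shared character prefix, then a
-- single positional walk over the dot-separated parts (objective: alternative).
-- helpers for A: the for-loop over parts carries path_so_far; strings are
-- handled at the Chars (List Char) level exactly as the PySem prelude does.
def pvAloop (ik : List Char) (vk : List (List Char)) :
    List (List Char) → List (List Char) → String
  | _, [] => String.ofList ("Missing parameter: '".toList ++ ik ++ "'".toList)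
  | path, part :: rest =>
    let path' := path ++ [part]
    let current := PySem.Chars.join ['.'] path'
    if ¬ vk.any (fun key => PySem.Chars.startswith key current) then
      let prev := PySem.List.slice path' none (some (-1))
      let pointer_pos := "Missing parameter: '".toList.length
        + (PySem.Chars.join ['.'] prev).length
        + (if prev ≠ [] then 1 else 0)
      String.ofList ("Missing parameter: '".toList ++ ik ++ "'\n".toList
        ++ List.replicate pointer_pos ' ' ++ List.replicate part.length '^'
        ++ "\n".toList ++ List.replicate pointer_pos ' '
        ++ "Non-existing parameter".toList)
    else pvAloop ik vk path' rest

def explain_invalid_key (invalid_key : String) (valid_keys : List String) : String :=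
  pvAloop invalid_key.toList (valid_keys.map String.toList) []
    (PySem.Chars.splitOn invalid_key.toList ['.'])

-- ===== PORT B =====
-- the inner while loop of Source B: length of the common character prefix
def pvCommonPref : List Char → List Char → Nat
  | k :: ks, i :: is => if k = i then pvCommonPref ks is + 1 else 0
  | _, _ => 0

def pvBloop (header : List Char) (cmax : Int) :
    Nat → List (List Char) → String
  | _, [] => String.ofList header
  | pos, part :: rest =>
    let e := pos + part.length
    if (e : Int) > cmax then
      let indent := List.replicate ("Missing parameter: '".toList.length + pos) ' '
      String.ofList (header ++ "\n".toList ++ indent ++ List.replicate part.length '^'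
        ++ "\n".toList ++ indent ++ "Non-existing parameter".toList)
    else pvBloop header cmax (e + 1) rest

def explain_invalid_key_alt (invalid_key : String) (valid_keys : List String) : String :=
  let header := "Missing parameter: '".toList ++ invalid_key.toList ++ "'".toList
  let cmax : Int := valid_keys.foldl
    (fun c key =>
      let cp : Int := pvCommonPref key.toList invalid_key.toList
      if cp > c then cp else c) (-1)
  pvBloop header cmax 0 (PySem.Chars.splitOn invalid_key.toList ['.'])

-- ===== PRECONDITION & SPEC =====
def Spec_explain_invalid_key (invalid_key : String) (valid_keys : List String) (out : String) : Prop := out = explain_invalid_key_alt invalid_key valid_keys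
instance (invalid_key : String) (valid_keys : List String) (out : String) : Decidable (Spec_explain_invalid_key invalid_key valid_keys out) := by unfold Spec_explain_invalid_key; infer_instance

-- ===== CLAIM (what is proved, stated in full; the proofs are below) =====
def Claim_equal_explain_invalid_key : Prop := ∀ (invalid_key : String) (valid_keys : List String), Dom_explain_invalid_key invalid_key valid_keys → Spec_explain_invalid_key invalid_key valid_keys (explain_invalid_key invalid_key valid_keys)

-- ===== LEMMAS AND PROOFS =====

-- join with '.' over a snoc
theorem pv_join_snoc (xs : List (List Char)) (z : List Char) :
    PySem.Chars.join ['.'] (xs ++ [z]) =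
      if xs = [] then z else PySem.Chars.join ['.'] xs ++ '.' :: z := by
  induction xs with
  | nil => simp [PySem.Chars.join_singleton]
  | cons a t ih =>
    cases t with
    | nil => simp [PySem.Chars.join_cons_cons, PySem.Chars.join_singleton]
    | cons b t' =>
      rw [show (a :: b :: t') ++ [z] = a :: b :: (t' ++ [z]) from by simp,
        PySem.Chars.join_cons_cons]
      rw [show b :: (t' ++ [z]) = (b :: t') ++ [z] from by simp, ih]
      simp [PySem.Chars.join_cons_cons, List.append_assoc]

-- join undoes PySem.Chars.splitOn (fuel invariant)
theorem pv_go_join (fuel : Nat) : ∀ (l cur : List Char) (accs : List (List Char)),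
    l.length < fuel →
    PySem.Chars.join ['.'] (PySem.Chars.splitOn.go ['.'] fuel l cur accs) =
      PySem.Chars.join ['.'] (accs.reverse ++ [cur.reverse]) ++ l := by
  induction fuel with
  | zero => intro l cur accs h; omega
  | succ n ih =>
    intro l cur accs h
    cases l with
    | nil => simp [PySem.Chars.splitOn.go]
    | cons c rest =>
      rw [PySem.Chars.splitOn.go]
      by_cases hc : c = '.'
      · subst hc
        simp only [List.isPrefixOf, beq_self_eq_true, Bool.true_and, List.length_singleton,
          List.drop_one, List.tail_cons, if_pos]
        rw [ih rest [] (cur.reverse :: accs) (by simpa using Nat.lt_of_succ_lt_succ h)]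
        rw [show (cur.reverse :: accs).reverse ++ [List.reverse []] =
              (accs.reverse ++ [cur.reverse]) ++ [([] : List Char)] from by simp]
        rw [pv_join_snoc]
        simp
      · rw [if_neg (by
          simp only [List.isPrefixOf, Bool.and_eq_true, beq_iff_eq]
          exact fun hh => hc hh.1.symm)]
        rw [ih rest (c :: cur) accs (by simpa using Nat.lt_of_succ_lt_succ h)]
        rw [show (c :: cur).reverse = cur.reverse ++ [c] from by simp]
        rw [pv_join_snoc, pv_join_snoc]
        split_ifs <;> simp

theorem pv_join_splitOn (s : List Char) :
    PySem.Chars.join ['.'] (PySem.Chars.splitOn s ['.']) = s := by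
  unfold PySem.Chars.splitOn
  rw [pv_go_join (s.length + 1) s [] [] (by omega)]
  simp [PySem.Chars.join_singleton]

theorem pv_join_prefix (xs ys : List (List Char)) :
    PySem.Chars.join ['.'] xs <+: PySem.Chars.join ['.'] (xs ++ ys) := by
  induction ys using List.reverseRecOn with
  | nil => simp
  | append_singleton ys z ih =>
    rw [show xs ++ (ys ++ [z]) = (xs ++ ys) ++ [z] from by simp, pv_join_snoc]
    by_cases h : xs ++ ys = []
    · rw [if_pos h]
      rcases List.append_eq_nil_iff.mp h with ⟨h1, _⟩
      subst h1
      simp [PySem.Chars.join_nil]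
    · rw [if_neg h]
      exact ih.trans (List.prefix_append _ _)

theorem pv_cp_iff (p : List Char) : ∀ (k i : List Char), p <+: i →
    ((p <+: k) ↔ p.length ≤ pvCommonPref k i) := by
  induction p with
  | nil => intro k i _; simp
  | cons a p' ih =>
    intro k i hpi
    cases i with
    | nil => simp at hpi
    | cons c i' =>
      obtain ⟨hac, hp'i'⟩ := by
        rw [List.cons_prefix_cons] at hpi; exact hpi
      subst hac
      cases k with
      | nil => simp [pvCommonPref]
      | cons b k' =>
        by_cases hb : b = a
        · subst hb
          simp only [pvCommonPref, List.cons_prefix_cons, List.length_cons,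
            if_true, true_and]
          rw [ih k' i' hp'i']
          omega
        · simp only [pvCommonPref, List.cons_prefix_cons]
          rw [if_neg hb]
          simp only [List.length_cons]
          constructor
          · rintro ⟨h1, -⟩; exact absurd h1.symm hb
          · omega

theorem pv_fold_max (ik : List Char) (l : List String) : ∀ (c0 e : Int),
    (e ≤ l.foldl (fun c key =>
        let cp : Int := pvCommonPref key.toList ik
        if cp > c then cp else c) c0)
      ↔ (e ≤ c0 ∨ ∃ k ∈ l, e ≤ (pvCommonPref k.toList ik : Int)) := by
  induction l with
  | nil => simp
  | cons a t ih =>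
    intro c0 e
    simp only [List.foldl_cons]
    rw [ih]
    constructor
    · rintro (h | h)
      · by_cases hgt : (pvCommonPref a.toList ik : Int) > c0
        · rw [if_pos hgt] at h
          exact Or.inr ⟨a, List.mem_cons_self .., h⟩
        · rw [if_neg hgt] at h
          exact Or.inl h
      · obtain ⟨k, hk, hek⟩ := h
        exact Or.inr ⟨k, List.mem_cons_of_mem _ hk, hek⟩
    · rintro (h | ⟨k, hk, hek⟩)
      · left; split_ifs with hgt <;> omega
      · rcases List.mem_cons.mp hk with rfl | hk'
        · left; split_ifs with hgt <;> omega
        · exact Or.inr ⟨k, hk', hek⟩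

theorem pv_main (ik : List Char) (vk : List String) (cmax : Int)
    (hcm : ∀ e : Nat, ((e : Int) ≤ cmax ↔ ∃ k ∈ vk, e ≤ pvCommonPref k.toList ik)) :
    ∀ (rem path : List (List Char)) (pos : Nat),
    ik = PySem.Chars.join ['.'] (path ++ rem) →
    pos = (PySem.Chars.join ['.'] path).length + (if path = [] then 0 else 1) →
    pvAloop ik (vk.map String.toList) path rem =
      pvBloop ("Missing parameter: '".toList ++ ik ++ "'".toList) cmax pos rem := by
  intro rem
  induction rem with
  | nil => intro path pos _ _; simp [pvAloop, pvBloop]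
  | cons part rest ih =>
    intro path pos hik hpos
    have hsnoc := pv_join_snoc path part
    have hlen : (PySem.Chars.join ['.'] (path ++ [part])).length = pos + part.length := by
      rw [hsnoc]
      by_cases hp : path = []
      · rw [if_pos hp]; subst hp; simp [PySem.Chars.join_nil] at hpos; omega
      · rw [if_neg hp]; rw [if_neg hp] at hpos; simp; omega
    have hpre : PySem.Chars.join ['.'] (path ++ [part]) <+: ik := by
      rw [hik, show path ++ part :: rest = (path ++ [part]) ++ rest from by simp]
      exact pv_join_prefix _ _
    have hcond : (((pos + part.length : Nat) : Int) ≤ cmax) ↔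
        (∃ k ∈ vk, PySem.Chars.join ['.'] (path ++ [part]) <+: k.toList) := by
      rw [hcm (pos + part.length)]
      constructor
      · rintro ⟨k, hk, hle⟩
        exact ⟨k, hk, (pv_cp_iff _ k.toList ik hpre).mpr (by rw [hlen]; exact hle)⟩
      · rintro ⟨k, hk, hle⟩
        exact ⟨k, hk, by rw [← hlen]; exact (pv_cp_iff _ k.toList ik hpre).mp hle⟩
    have hany : ((vk.map String.toList).any
        (fun key => PySem.Chars.startswith key (PySem.Chars.join ['.'] (path ++ [part]))) = true) ↔
        (∃ k ∈ vk, PySem.Chars.join ['.'] (path ++ [part]) <+: k.toList) := by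
      simp [List.any_map, List.any_eq_true, PySem.Chars.startswith_iff, Function.comp]
    simp only [pvAloop, pvBloop]
    by_cases hex : ∃ k ∈ vk, PySem.Chars.join ['.'] (path ++ [part]) <+: k.toList
    · rw [if_neg (by rw [hany]; exact fun h => h hex)]
      rw [if_neg (show ¬ (((pos + part.length : Nat) : Int) > cmax) from by
        rw [not_lt]; exact hcond.mpr hex)]
      exact ih (path ++ [part]) (pos + part.length + 1)
        (by rw [hik]; simp)
        (by rw [if_neg (by simp)]; omega)
    · rw [if_pos (by rw [hany]; exact hex)]
      rw [if_pos (show (((pos + part.length : Nat) : Int) > cmax) from by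
        rw [gt_iff_lt, ← not_le]; exact fun h => hex (hcond.mp h))]
      have hslice : PySem.List.slice (path ++ [part]) none (some (-1)) = path := by
        simp [PySem.List.slice]
      rw [hslice]
      have hpp : "Missing parameter: '".toList.length
          + (PySem.Chars.join ['.'] path).length + (if path ≠ [] then 1 else 0)
          = "Missing parameter: '".toList.length + pos := by
        by_cases hp : path = [] <;> simp [hp] at hpos ⊢ <;> omega
      rw [hpp]
      have hq : ("'\n".toList : List Char) = "'".toList ++ "\n".toList := by decide
      rw [hq]
      simp [List.append_assoc]

-- ===== VERDICT (by name: the statement is the Claim_ definition above) =====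
theorem explain_invalid_key_spec : Claim_equal_explain_invalid_key := by
  intro ik vk _
  unfold Spec_explain_invalid_key explain_invalid_key explain_invalid_key_alt
  apply (pv_main ik.toList vk _ (fun e => pv_fold_max ik.toList vk (-1) e |>.trans (by
      constructor
      · rintro (h | h)
        · omega
        · obtain ⟨k, hk, hek⟩ := h
          exact ⟨k, hk, by exact_mod_cast hek⟩
      · rintro ⟨k, hk, hek⟩
        exact Or.inr ⟨k, hk, by exact_mod_cast hek⟩)) _ [] 0
    (by rw [List.nil_append, pv_join_splitOn])
    (by simp [PySem.Chars.join_nil]))
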